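-- pv_equiv track=rewrite | github.com/pypi-data/pypi-mirror-206 | packages/forbidden/forbidden-9.7-py3-none-any.whl/forbidden/forbidden.py | get_port_override_headers
-- ===== SOURCE A (Python) =====
-- def unique(sequence):
-- 	seen = set()
-- 	return [x for x in sequence if not (x in seen or seen.add(x))]
--
-- def get_port_override_headers(ports):
-- 	tmp = []
-- 	headers = [
-- 		"X-Forwarded-Port"
-- 	]
-- 	for header in headers:
-- 		for port in ports:
-- 			tmp.append(("{0}: {1}").format(header, port))
-- 	return unique(tmp)
-- ===== SOURCE B (Python) =====
-- def get_port_override_headers(ports):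
-- 	return ["X-Forwarded-Port: {0}".format(port) for port in dict.fromkeys(ports)]
-- ===== Notes on version B (the rewrite author's own statement) =====
-- stated objective: simpler
-- what changed: B deduplicates the ports first (order-preserving dict.fromkeys) and formats each distinct port once in a single comprehension, instead of A's nested header/port loops building all strings and then deduplicating the strings with a seen-set helper.
import Mathlib
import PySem

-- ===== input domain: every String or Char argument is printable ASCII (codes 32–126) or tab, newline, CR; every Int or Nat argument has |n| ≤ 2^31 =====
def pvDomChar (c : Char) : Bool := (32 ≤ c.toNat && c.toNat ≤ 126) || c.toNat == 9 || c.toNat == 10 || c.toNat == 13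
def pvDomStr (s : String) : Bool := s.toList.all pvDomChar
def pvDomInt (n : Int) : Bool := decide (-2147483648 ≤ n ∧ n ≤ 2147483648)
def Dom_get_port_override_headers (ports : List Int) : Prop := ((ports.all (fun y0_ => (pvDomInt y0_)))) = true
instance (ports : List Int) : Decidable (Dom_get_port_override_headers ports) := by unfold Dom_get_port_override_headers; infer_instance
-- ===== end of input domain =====

-- B deduplicates the ports first (dict.fromkeys) and then formats each once, instead of
-- formatting every port and deduplicating the strings; objective: simpler.

-- ===== PORT A =====
-- A's helper 'unique': seen-set comprehension keeping first occurrences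
def pyUnique (sequence : List String) : List String :=
  (sequence.foldl
    (fun (st : PySem.Set String × List String) x =>
      if PySem.Set.contains st.1 x then st else (PySem.Set.add st.1 x, st.2 ++ [x]))
    (PySem.Set.empty, [])).2

def get_port_override_headers (ports : List Int) : List String :=
  let tmp : List String := []
  let headers : List String := ["X-Forwarded-Port"]
  let tmp := headers.foldl
    (fun tmp header =>
      ports.foldl (fun tmp port => tmp ++ [header ++ ": " ++ PySem.Int.toStr port]) tmp)
    tmp
  pyUnique tmp

-- ===== PORT B =====
def get_port_override_headers_alt (ports : List Int) : List String :=
  (PySem.List.dedup ports).map (fun port => "X-Forwarded-Port: " ++ PySem.Int.toStr port)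

-- ===== PRECONDITION & SPEC =====
def Spec_get_port_override_headers (ports : List Int) (out : List String) : Prop := out = get_port_override_headers_alt ports
instance (ports : List Int) (out : List String) : Decidable (Spec_get_port_override_headers ports out) := by unfold Spec_get_port_override_headers; infer_instance

-- ===== CLAIM (what is proved, stated in full; the proofs are below) =====
def Claim_equal_get_port_override_headers : Prop := ∀ (ports : List Int), Dom_get_port_override_headers ports → Spec_get_port_override_headers ports (get_port_override_headers ports)

-- ===== LEMMAS AND PROOFS =====

-- decimal value of a digit-character list (right-associated place values)
def pvW : List Char → Nat
  | [] => 0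
  | c :: cs => (c.toNat - 48) * 10 ^ cs.length + pvW cs

theorem pvW_digitChar (m : Nat) (h : m < 10) : (Nat.digitChar m).toNat - 48 = m := by
  interval_cases m <;> decide

theorem pvW_toDigitsCore : ∀ (fuel n : Nat) (ds : List Char), n < 10 ^ fuel →
    pvW (Nat.toDigitsCore 10 fuel n ds) = n * 10 ^ ds.length + pvW ds := by
  intro fuel
  induction fuel with
  | zero =>
      intro n ds h
      simp at h
      subst h
      simp [Nat.toDigitsCore]
  | succ fuel ih =>
      intro n ds h
      rw [Nat.toDigitsCore]
      by_cases h0 : n / 10 = 0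
      · rw [if_pos h0]
        have hn : n < 10 := by omega
        have : n % 10 = n := Nat.mod_eq_of_lt hn
        simp [pvW, this, pvW_digitChar n hn]
      · rw [if_neg h0]
        have hlt : n / 10 < 10 ^ fuel := by
          rw [Nat.div_lt_iff_lt_mul (by norm_num)]
          calc n < 10 ^ (fuel + 1) := h
            _ = 10 ^ fuel * 10 := by ring
        rw [ih (n / 10) _ hlt]
        have hm : n % 10 < 10 := Nat.mod_lt _ (by norm_num)
        have key : n / 10 * 10 ^ (ds.length + 1) + n % 10 * 10 ^ ds.length = n * 10 ^ ds.length := by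
          have h2 : 10 * (n / 10) + n % 10 = n := Nat.div_add_mod n 10
          calc n / 10 * 10 ^ (ds.length + 1) + n % 10 * 10 ^ ds.length
              = (10 * (n / 10) + n % 10) * 10 ^ ds.length := by ring
            _ = n * 10 ^ ds.length := by rw [h2]
        simp only [pvW, List.length_cons, pvW_digitChar _ hm]
        rw [← Nat.add_assoc, key]

theorem pvW_toDigits (n : Nat) : pvW (Nat.toDigits 10 n) = n := by
  have h : n < 10 ^ (n + 1) := by
    calc n < 10 ^ n := Nat.lt_pow_self (by norm_num)
      _ ≤ 10 ^ (n + 1) := Nat.pow_le_pow_right (by norm_num) (by omega)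
  have := pvW_toDigitsCore (n + 1) n [] h
  simpa [Nat.toDigits, pvW] using this

theorem toDigits_inj : Function.Injective (Nat.toDigits 10) := by
  intro a b h
  have := congrArg pvW h
  rwa [pvW_toDigits, pvW_toDigits] at this

theorem digitChar_ne_minus (m : Nat) : Nat.digitChar m ≠ '-' := by
  by_cases h : m < 16
  · interval_cases m <;> decide
  · unfold Nat.digitChar
    repeat rw [if_neg (by omega)]
    decide

theorem minus_not_mem_toDigitsCore : ∀ (fuel n : Nat) (ds : List Char),
    '-' ∉ ds → '-' ∉ Nat.toDigitsCore 10 fuel n ds := by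
  intro fuel
  induction fuel with
  | zero => intro n ds h; simpa [Nat.toDigitsCore] using h
  | succ fuel ih =>
      intro n ds h
      rw [Nat.toDigitsCore]
      by_cases h0 : n / 10 = 0
      · rw [if_pos h0]
        intro hmem
        rcases List.mem_cons.mp hmem with h1 | h1
        · exact digitChar_ne_minus _ h1.symm
        · exact h h1
      · rw [if_neg h0]
        apply ih
        intro hmem
        rcases List.mem_cons.mp hmem with h1 | h1
        · exact digitChar_ne_minus _ h1.symm
        · exact h h1

theorem minus_not_mem_toDigits (n : Nat) : '-' ∉ Nat.toDigits 10 n :=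
  minus_not_mem_toDigitsCore (n + 1) n [] (by simp)

theorem toChars_inj : Function.Injective PySem.Int.toChars := by
  intro a b h
  unfold PySem.Int.toChars at h
  by_cases ha : a < 0 <;> by_cases hb : b < 0
  · rw [if_pos ha, if_pos hb] at h
    simp only [List.cons.injEq, true_and] at h
    have := toDigits_inj h
    omega
  · rw [if_pos ha, if_neg hb] at h
    exact absurd (h ▸ List.mem_cons_self) (minus_not_mem_toDigits _)
  · rw [if_neg ha, if_pos hb] at h
    exact absurd (h ▸ List.mem_cons_self) (minus_not_mem_toDigits _)
  · rw [if_neg ha, if_neg hb] at h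
    have := toDigits_inj h
    omega

theorem toStr_inj : Function.Injective PySem.Int.toStr := by
  intro a b h
  have := congrArg String.toList h
  rw [PySem.Int.toList_toStr, PySem.Int.toList_toStr] at this
  exact toChars_inj this

theorem fmt_inj : Function.Injective (fun port : Int => "X-Forwarded-Port: " ++ PySem.Int.toStr port) := by
  intro a b h
  simp only at h
  have := congrArg String.toList h
  simp only [String.toList_append] at this
  exact toStr_inj (String.toList_injective (List.append_cancel_left this))

-- the inner append-fold of A builds the map
theorem foldl_append_map (f : Int → String) : ∀ (l : List Int) (acc : List String),
    l.foldl (fun t p => t ++ [f p]) acc = acc ++ l.map f := by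
  intro l
  induction l with
  | nil => simp
  | cons x xs ih => intro acc; simp [List.foldl, ih, List.map]

-- A's 'unique' is first-occurrence dedup
theorem pyUnique_foldl : ∀ (l : List String) (s : PySem.Set String),
    l.foldl
      (fun (st : PySem.Set String × List String) x =>
        if PySem.Set.contains st.1 x then st else (PySem.Set.add st.1 x, st.2 ++ [x]))
      (s, s) = (l.foldl PySem.Set.add s, l.foldl PySem.Set.add s) := by
  intro l
  induction l with
  | nil => intro s; simp
  | cons x xs ih =>
      intro s
      simp only [List.foldl]
      have hstep : (if PySem.Set.contains s x then ((s : PySem.Set String), (s : List String))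
            else (PySem.Set.add s x, s ++ [x]))
          = (PySem.Set.add s x, (PySem.Set.add s x : List String)) := by
        simp only [PySem.Set.add, PySem.Set.contains]
        by_cases h : x ∈ s <;> simp [h]
      rw [hstep, ih]

theorem pyUnique_eq_dedup (l : List String) : pyUnique l = PySem.List.dedup l := by
  unfold pyUnique
  rw [show (PySem.Set.empty, ([] : List String)) = ((PySem.Set.empty : PySem.Set String), (PySem.Set.empty : PySem.Set String)) from rfl]
  rw [pyUnique_foldl, PySem.List.dedup_eq_ofList, PySem.Set.ofList_eq_foldl]
  rfl

-- dedup commutes with an injective map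
theorem foldl_add_map_inj (f : Int → String) (hf : Function.Injective f) :
    ∀ (l : List Int) (s : PySem.Set Int),
      (l.map f).foldl PySem.Set.add (s.map f) = (l.foldl PySem.Set.add s).map f := by
  intro l
  induction l with
  | nil => intro s; simp
  | cons x xs ih =>
      intro s
      simp only [List.map, List.foldl]
      have hc : (s.map f).contains (f x) = s.contains x := by
        simp [List.mem_map, hf.eq_iff]
      have : PySem.Set.add (s.map f) (f x) = (PySem.Set.add s x).map f := by
        simp only [PySem.Set.add, PySem.Set.contains, hc]
        by_cases h : x ∈ s <;> simp [h]
      rw [this, ih]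

theorem dedup_map_inj (f : Int → String) (hf : Function.Injective f) (l : List Int) :
    PySem.List.dedup (l.map f) = (PySem.List.dedup l).map f := by
  rw [PySem.List.dedup_eq_ofList, PySem.List.dedup_eq_ofList,
    PySem.Set.ofList_eq_foldl, PySem.Set.ofList_eq_foldl]
  have := foldl_add_map_inj f hf l []
  simpa using this

-- ===== VERDICT (by name: the statement is the Claim_ definition above) =====
theorem get_port_override_headers_spec : Claim_equal_get_port_override_headers := by
  unfold Claim_equal_get_port_override_headers
  intro ports _
  unfold Spec_get_port_override_headers get_port_override_headers get_port_override_headers_alt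
  simp only [List.foldl]
  rw [foldl_append_map (fun p => "X-Forwarded-Port" ++ ": " ++ PySem.Int.toStr p) ports []]
  have hfmt : (fun p : Int => "X-Forwarded-Port" ++ ": " ++ PySem.Int.toStr p)
      = (fun p : Int => "X-Forwarded-Port: " ++ PySem.Int.toStr p) := by
    funext p
    rw [String.append_assoc]
    rfl
  rw [hfmt]
  simp only [List.nil_append]
  rw [pyUnique_eq_dedup, dedup_map_inj _ fmt_inj]
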